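-- pv_equiv track=rewrite | github.com/pc5401/my_BOJ | 백준/Silver/6219. 소수의 자격/소수의 자격.py | solve
-- ===== SOURCE A (Python) =====
-- def solve(A: int, B: int, D: int) -> int:
--     # 예라스토체
--     dp = [1] * (B+1)
--     dp[0], dp[1] = 0, 0
--
--     lst = []
--
--     for i in range(2, B+1):
--         if dp[i] == 0:
--             continue
--
--         if i >= A:
--             lst.append(i)
--
--         for j in range(i, B+1, i):
--             dp[j] = 0
--
--     # 범위 내 수
--     cnt = 0
--     for n in lst:
--         num = n
--         while num:
--             if num % 10 == D:
--                 cnt += 1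
--                 break
--
--             num //= 10
--
--     return cnt
-- ===== SOURCE B (Python) =====
-- def solve(A: int, B: int, D: int) -> int:
--     def is_prime(n):
--         d = 2
--         while d * d <= n:
--             if n % d == 0:
--                 return False
--             d += 1
--         return True
--
--     def digits(n):
--         ds = []
--         while n:
--             ds.append(n % 10)
--             n //= 10
--         return ds
--
--     cnt = 0
--     for n in range(max(A, 2), B + 1):
--         if is_prime(n) and D in digits(n):
--             cnt += 1
--     return cnt
-- ===== Notes on version B (the rewrite author's own statement) =====
-- stated objective: simpler
-- what changed: Replaces the sieve of Eratosthenes over a dp array plus a collected prime list with a single pass over range(max(A,2), B+1) that tests each number by trial division and checks the digit by membership in its digit list.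
import Mathlib
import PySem

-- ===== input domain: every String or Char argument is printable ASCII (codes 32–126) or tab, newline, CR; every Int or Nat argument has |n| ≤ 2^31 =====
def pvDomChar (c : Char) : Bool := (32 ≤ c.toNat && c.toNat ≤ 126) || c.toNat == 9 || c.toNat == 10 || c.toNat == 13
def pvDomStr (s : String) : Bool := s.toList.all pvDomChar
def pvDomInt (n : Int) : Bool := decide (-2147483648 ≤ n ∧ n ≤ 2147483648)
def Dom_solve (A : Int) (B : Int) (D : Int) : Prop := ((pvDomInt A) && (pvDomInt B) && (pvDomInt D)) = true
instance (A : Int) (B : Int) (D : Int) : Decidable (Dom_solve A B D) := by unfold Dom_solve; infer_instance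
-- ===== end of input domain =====

-- B replaces A's sieve-then-scan with a single pass of trial-division primality plus a
-- digit-list membership test (objective: simpler); return values agree on B ≥ 1, where A returns.

-- ===== PORT A =====
-- the 'while num: …' digit loop of A; called only on positive num (elements of lst are ≥ 2),
-- where it is exact (on num ≤ 0 Python's loop would not terminate / not run)
def digitHitA (D : Int) (num : Nat) : Bool :=
  if num = 0 then false
  else if PySem.Int.mod (num : Int) 10 == D then true
  else digitHitA D (PySem.Int.floordiv (num : Int) 10).toNat
termination_by num
decreasing_by
  have h10 : PySem.Int.floordiv (num : Int) 10 = ((num / 10 : Nat) : Int) := by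
    exact_mod_cast PySem.Int.floordiv_natCast num 10
  rw [h10]; simp only [Int.toNat_natCast]; omega

-- dp = [1]*(B+1); dp[0], dp[1] = 0, 0  (both assignments in range exactly when B ≥ 1 = Pre_)
def sieveInit (B : Int) : List Int :=
  PySem.List.pySetD (PySem.List.pySetD (List.replicate (B + 1).toNat (1 : Int)) 0 0) 1 0

-- for j in range(i, B+1, i): dp[j] = 0
def sieveInner (B : Int) (dp : List Int) (i : Int) : List Int :=
  (PySem.List.pyRange i (B + 1) i).foldl (fun dp j => PySem.List.pySetD dp j 0) dp

-- one iteration of A's outer sieve loop; state = (dp, lst)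
def sieveStep (A B : Int) (s : List Int × List Int) (i : Int) : List Int × List Int :=
  if PySem.List.pyGetD s.1 i 0 == 0 then s
  else (sieveInner B s.1 i, if A ≤ i then s.2 ++ [i] else s.2)

def solve (A : Int) (B : Int) (D : Int) : Int :=
  let s := (PySem.List.pyRange 2 (B + 1) 1).foldl (sieveStep A B) (sieveInit B, [])
  s.2.foldl (fun cnt n => if digitHitA D n.toNat then cnt + 1 else cnt) 0

-- ===== PORT B =====
-- the trial-division while loop of Source B's is_prime, started at d = 2
def trialDiv (n : Int) (d : Nat) : Bool :=
  if h : (d : Int) * (d : Int) ≤ n then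
    if PySem.Int.mod n (d : Int) == 0 then false
    else trialDiv n (d + 1)
  else true
termination_by n.toNat + 1 - d
decreasing_by
  have hd : (d : Int) ≤ n := by nlinarith [Int.natCast_nonneg d]
  omega

-- Source B's digits(n): least-significant first; called only on n ≥ 2, where toNat is exact
def digitsB (num : Nat) : List Int :=
  if num = 0 then []
  else PySem.Int.mod (num : Int) 10 :: digitsB (PySem.Int.floordiv (num : Int) 10).toNat
termination_by num
decreasing_by
  have h10 : PySem.Int.floordiv (num : Int) 10 = ((num / 10 : Nat) : Int) := by
    exact_mod_cast PySem.Int.floordiv_natCast num 10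
  rw [h10]; simp only [Int.toNat_natCast]; omega

def solve_alt (A : Int) (B : Int) (D : Int) : Int :=
  (PySem.List.pyRange (max A 2) (B + 1) 1).foldl
    (fun cnt n => if trialDiv n 2 && (digitsB n.toNat).contains D then cnt + 1 else cnt) 0

-- ===== PRECONDITION & SPEC =====
-- Pre_ excludes exactly B ≤ 0, where A raises IndexError (dp[0]/dp[1] on a list of length ≤ 1)
def Pre_solve (A : Int) (B : Int) (D : Int) : Prop := 1 ≤ B
instance (A : Int) (B : Int) (D : Int) : Decidable (Pre_solve A B D) := by unfold Pre_solve; infer_instance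
def pvWitness_solve : Int × Int × Int := (1, 10, 3)

def Spec_solve (A : Int) (B : Int) (D : Int) (out : Int) : Prop := out = solve_alt A B D
instance (A : Int) (B : Int) (D : Int) (out : Int) : Decidable (Spec_solve A B D out) := by unfold Spec_solve; infer_instance

-- ===== CLAIM (what is proved, stated in full; the proofs are below) =====
def Claim_equal_solve : Prop := ∀ (A : Int) (B : Int) (D : Int), Dom_solve A B D → Pre_solve A B D → Spec_solve A B D (solve A B D)

-- ===== LEMMAS AND PROOFS =====

-- A's early-break digit scan computes digit membership
theorem digitHit_eq_contains (D : Int) (m : Nat) : digitHitA D m = (digitsB m).contains D := by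
  fun_induction digitHitA D m
  case case1 => rw [digitsB]; simp
  case case2 n h hmod =>
    rw [digitsB, if_neg h, List.contains_cons]
    simp only [beq_iff_eq] at hmod
    subst hmod; simp
  case case3 n h hmod ih =>
    rw [digitsB, if_neg h, List.contains_cons, ih]
    simp only [beq_iff_eq] at hmod
    simp
    intro hc
    exact absurd (by simpa using hc.symm) hmod

-- trialDiv scans d, d+1, … while d*d ≤ n for a divisor
theorem trialDiv_iff (n : Int) (d : Nat) :
    trialDiv n d = true ↔ ∀ e : Nat, d ≤ e → (e : Int) * e ≤ n → ¬ ((e : Int) ∣ n) := by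
  fun_induction trialDiv n d
  case case1 d hle hmod =>
    simp only [Bool.false_eq_true, false_iff]
    intro hall
    have hmod' : PySem.Int.mod n (d : Int) = 0 := by simpa using hmod
    exact hall d le_rfl hle ((PySem.Int.mod_eq_zero_iff_dvd n d).mp hmod')
  case case2 d hle hmod ih =>
    rw [ih]
    constructor
    · intro hall e he hee
      rcases Nat.eq_or_lt_of_le he with rfl | hlt
      · intro hdvd
        have hmod' : PySem.Int.mod n (d : Int) = 0 := (PySem.Int.mod_eq_zero_iff_dvd n d).mpr hdvd
        exact (by simpa using hmod : ¬ PySem.Int.mod n (d : Int) = 0) hmod'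
      · exact hall e hlt hee
    · intro hall e he hee
      exact hall e (Nat.le_of_succ_le he) hee
  case case3 d hgt =>
    simp only [true_iff]
    intro e he hee
    exfalso
    apply hgt
    calc (d : Int) * d ≤ (e : Int) * e := by
          have : (d : Int) ≤ e := by exact_mod_cast he
          nlinarith [Int.natCast_nonneg d]
      _ ≤ n := hee

theorem prime_iff_no_div (p : Nat) (hp : 2 ≤ p) :
    (∀ d : Nat, 2 ≤ d → d < p → ¬ d ∣ p) ↔ p.Prime := by
  constructor
  · intro h
    rw [Nat.prime_def_lt]
    refine ⟨hp, fun m hm hdvd => ?_⟩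
    by_contra hne
    have hm0 : m ≠ 0 := by rintro rfl; rw [zero_dvd_iff] at hdvd; omega
    exact h m (by omega) hm hdvd
  · intro hP d h2 hlt hdvd
    rcases (Nat.Prime.eq_one_or_self_of_dvd hP d hdvd) with rfl | rfl
    · omega
    · omega

theorem trialDiv_eq_prime (n : Int) (hn : 2 ≤ n) : trialDiv n 2 = decide (Nat.Prime n.toNat) := by
  have hcast : n = (n.toNat : Int) := by omega
  rcases Bool.eq_false_or_eq_true (trialDiv n 2) with ht | hf
  · rw [ht]
    symm; rw [decide_eq_true_eq]
    have hall := (trialDiv_iff n 2).mp ht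
    rw [Nat.prime_def_le_sqrt]
    refine ⟨by omega, fun m hm2 hmsq => ?_⟩
    intro hdvd
    have hmm : m * m ≤ n.toNat := Nat.le_sqrt.mp hmsq
    exact hall m hm2 (by omega) (by rw [hcast]; exact_mod_cast hdvd)
  · rw [hf]
    symm; rw [decide_eq_false_iff_not]
    intro hP
    have := (trialDiv_iff n 2).not.mp (by simp [hf])
    push Not at this
    obtain ⟨e, he2, hee, hdvd⟩ := this
    have hednat : e ∣ n.toNat := by
      rw [hcast] at hdvd; exact_mod_cast hdvd
    have helt : e < n.toNat := by
      have he1 : (1:Int) < e := by exact_mod_cast (by omega : (1:Nat) < e)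
      have : (e:Int) < n := by nlinarith
      omega
    exact (prime_iff_no_div n.toNat (by omega)).mpr hP e he2 helt hednat

theorem length_foldl_pySetD (L : List Int) (dp : List Int) :
    (L.foldl (fun dp j => PySem.List.pySetD dp j 0) dp).length = dp.length := by
  induction L generalizing dp with
  | nil => rfl
  | cons j L ih => simp only [List.foldl_cons]; rw [ih, PySem.List.length_pySetD]

theorem getD_foldl_pySetD (L : List Int) (dp : List Int) (k : Nat)
    (hL : ∀ j ∈ L, 0 ≤ j) (hk : k < dp.length) :
    (L.foldl (fun dp j => PySem.List.pySetD dp j 0) dp).getD k 0 =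
      if (k : Int) ∈ L then 0 else dp.getD k 0 := by
  induction L generalizing dp with
  | nil => simp
  | cons j L ih =>
    simp only [List.foldl_cons]
    have hj : 0 ≤ j := hL j (by simp)
    rw [ih _ (fun x hx => hL x (by simp [hx]))
        (by rw [PySem.List.pySetD_of_nonneg _ _ hj, List.length_set]; exact hk)]
    rw [PySem.List.pySetD_of_nonneg _ _ hj]
    by_cases hmem : (k : Int) ∈ L
    · simp [hmem]
    · simp only [List.mem_cons, hmem, or_false]
      by_cases hkj : (k : Int) = j
      · have hjk : j.toNat = k := by omega
        simp [hkj, hjk, List.getD_eq_getElem?_getD, hk]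
      · have hjk : j.toNat ≠ k := by omega
        simp [hkj, List.getD_eq_getElem?_getD, hjk]

theorem getD_sieveInner (B : Int) (dp : List Int) (i : Int) (hi : 2 ≤ i) (k : Nat)
    (hk : k < dp.length) (hlen : dp.length = (B + 1).toNat) :
    (sieveInner B dp i).getD k 0 =
      if i ≤ (k : Int) ∧ i ∣ (k : Int) then 0 else dp.getD k 0 := by
  unfold sieveInner
  rw [getD_foldl_pySetD _ _ _
      (fun j hj => by
        have := (PySem.List.mem_pyRange_iff_of_pos (by omega : (0:Int) < i) j).mp hj
        omega) hk]
  congr 1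
  rw [PySem.List.mem_pyRange_iff_of_pos (by omega : (0:Int) < i)]
  have hkB : (k : Int) < B + 1 := by omega
  have hdvd : (i ∣ (k : Int) - i) ↔ (i ∣ (k : Int)) := by
    constructor
    · intro h; have := dvd_add h (dvd_refl i); simpa using this
    · intro h; exact dvd_sub h (dvd_refl i)
  rw [eq_iff_iff]
  constructor
  · rintro ⟨h1, _, h3⟩; exact ⟨h1, hdvd.mp h3⟩
  · rintro ⟨h1, h2⟩; exact ⟨h1, hkB, hdvd.mpr h2⟩

def SieveInv (B : Int) (m : Int) (dp : List Int) : Prop :=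
  dp.length = (B + 1).toNat ∧
  ∀ k : Nat, k < dp.length →
    (dp.getD k 0 ≠ 0 ↔ 2 ≤ k ∧ ∀ d : Nat, 2 ≤ d → (d : Int) < m → ¬ d ∣ k)

theorem sieve_main (A B : Int) (hB : 1 ≤ B) (m : Int) (hm2 : 2 ≤ m) (hmB : m ≤ B + 1) :
    SieveInv B m ((PySem.List.pyRange 2 m 1).foldl (sieveStep A B) (sieveInit B, [])).1 ∧
    ((PySem.List.pyRange 2 m 1).foldl (sieveStep A B) (sieveInit B, [])).2 =
      (PySem.List.pyRange 2 m 1).filter (fun i => decide (A ≤ i) && decide (Nat.Prime i.toNat)) := by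
  revert hmB
  induction m, hm2 using Int.le_induction with
  | base =>
    intro _
    rw [PySem.List.pyRange_one_eq_nil (le_refl 2)]
    simp only [List.foldl_nil, List.filter_nil]
    refine ⟨⟨?_, ?_⟩, trivial⟩
    · unfold sieveInit
      rw [PySem.List.length_pySetD, PySem.List.length_pySetD, List.length_replicate]
    · intro k hk
      unfold sieveInit at hk ⊢
      rw [PySem.List.length_pySetD, PySem.List.length_pySetD, List.length_replicate] at hk
      have h01 : PySem.List.pySetD (PySem.List.pySetD (List.replicate (B+1).toNat (1:Int)) 0 0) 1 0
          = ((List.replicate (B+1).toNat (1:Int)).set 0 0).set 1 0 := by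
        rw [PySem.List.pySetD_of_nonneg _ _ (by norm_num), PySem.List.pySetD_of_nonneg _ _ (by norm_num)]
        norm_num
      rw [h01]
      have hlen2 : k < (((List.replicate (B+1).toNat (1:Int)).set 0 0).set 1 0).length := by
        simpa using hk
      rw [List.getD_eq_getElem _ _ hlen2]
      rcases Nat.lt_or_ge k 2 with hklt | hkge
      · have hv : (((List.replicate (B+1).toNat (1:Int)).set 0 0).set 1 0)[k] = 0 := by
          interval_cases k <;> simp
        rw [hv]
        simp only [ne_eq, not_true_eq_false, false_iff]
        rintro ⟨hk2, -⟩
        omega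
      · have hv : (((List.replicate (B+1).toNat (1:Int)).set 0 0).set 1 0)[k] = 1 := by
          rw [List.getElem_set, if_neg (by omega), List.getElem_set, if_neg (by omega),
            List.getElem_replicate]
        rw [hv]
        exact ⟨fun _ => ⟨hkge, fun d hd hdlt => by omega⟩, fun _ => one_ne_zero⟩
  | succ n hn ih =>
    intro hle
    obtain ⟨⟨hlen, hinv⟩, hlst⟩ := ih (by omega)
    rw [PySem.List.pyRange_one_succ_right (by omega : (2:Int) ≤ n), List.foldl_append,
      List.filter_append]
    simp only [List.foldl_cons, List.foldl_nil, List.filter_cons, List.filter_nil]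
    set s := (PySem.List.pyRange 2 n 1).foldl (sieveStep A B) (sieveInit B, []) with hs
    have hn0 : (0:Int) ≤ n := by omega
    have hnlen : n.toNat < s.1.length := by rw [hlen]; omega
    have hget : PySem.List.pyGetD s.1 n 0 = s.1.getD n.toNat 0 := by
      rw [PySem.List.pyGetD_eq_getElem _ _ hn0 (by exact_mod_cast by rw [hlen]; omega),
        List.getD_eq_getElem _ _ hnlen]
    have hiff := hinv n.toNat hnlen
    have hchar : s.1.getD n.toNat 0 ≠ 0 ↔ Nat.Prime n.toNat := by
      rw [hiff, ← prime_iff_no_div n.toNat (by omega)]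
      constructor
      · rintro ⟨-, hall⟩ d hd hdlt
        exact hall d hd (by omega)
      · intro hall
        exact ⟨by omega, fun d hd hdlt => hall d hd (by omega)⟩
    by_cases hp : Nat.Prime n.toNat
    · have hne : s.1.getD n.toNat 0 ≠ 0 := hchar.mpr hp
      have hstep : sieveStep A B s n = (sieveInner B s.1 n, if A ≤ n then s.2 ++ [n] else s.2) := by
        unfold sieveStep
        rw [hget, if_neg (by simpa using hne)]
      rw [hstep]
      refine ⟨⟨?_, ?_⟩, ?_⟩
      · show (sieveInner B s.1 n).length = _
        unfold sieveInner
        rw [length_foldl_pySetD, hlen]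
      · intro k hk'
        have hk : k < s.1.length := by
          unfold sieveInner at hk'
          rwa [length_foldl_pySetD] at hk'
        rw [getD_sieveInner B s.1 n (by omega) k hk hlen]
        split_ifs with hcond
        · simp only [ne_eq, not_true_eq_false, false_iff]
          rintro ⟨hk2, hall⟩
          obtain ⟨hnk, hdvd⟩ := hcond
          refine hall n.toNat (by omega) (by omega) ?_
          have h' : (n.toNat : Int) ∣ (k : Int) := by rwa [Int.toNat_of_nonneg hn0]
          exact_mod_cast h'
        · rw [hinv k hk]
          constructor
          · rintro ⟨hk2, hall⟩
            refine ⟨hk2, fun d hd hdlt => ?_⟩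
            rcases lt_or_ge (d : Int) n with h' | h'
            · exact hall d hd h'
            · have hdn : (d : Int) = n := by omega
              intro hdk
              apply hcond
              have hdvd : n ∣ (k : Int) := by
                rw [← hdn]
                exact_mod_cast hdk
              have hkpos : (0:Int) < k := by exact_mod_cast (by omega : 0 < k)
              exact ⟨Int.le_of_dvd hkpos hdvd, hdvd⟩
          · rintro ⟨hk2, hall⟩
            exact ⟨hk2, fun d hd hdlt => hall d hd (by omega)⟩
      · rw [hlst]
        by_cases hA : A ≤ n
        · simp [hA, hp]
        · simp [hA, hp]
    · have heq0 : s.1.getD n.toNat 0 = 0 := by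
        by_contra hne
        exact hp (hchar.mp hne)
      have hstep : sieveStep A B s n = s := by
        unfold sieveStep
        rw [hget, if_pos (by simpa using heq0)]
      rw [hstep]
      obtain ⟨d0, hd02, hd0lt, hd0dvd⟩ : ∃ d0 : Nat, 2 ≤ d0 ∧ (d0:Int) < n ∧ d0 ∣ n.toNat := by
        have hnX : ¬ (2 ≤ n.toNat ∧ ∀ d : Nat, 2 ≤ d → (d : Int) < n → ¬ d ∣ n.toNat) := by
          rw [← hiff]
          exact not_not.mpr heq0
        push Not at hnX
        obtain ⟨d0, h1, h2, h3⟩ := hnX (by omega)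
        exact ⟨d0, h1, h2, h3⟩
      refine ⟨⟨hlen, fun k hk => ?_⟩, ?_⟩
      · rw [hinv k hk]
        constructor
        · rintro ⟨hk2, hall⟩
          refine ⟨hk2, fun d hd hdlt => ?_⟩
          rcases lt_or_ge (d : Int) n with h' | h'
          · exact hall d hd h'
          · have hdn : d = n.toNat := by omega
            intro hdk
            rw [hdn] at hdk
            exact hall d0 hd02 hd0lt (dvd_trans hd0dvd hdk)
        · rintro ⟨hk2, hall⟩
          exact ⟨hk2, fun d hd hdlt => hall d hd (by omega)⟩
      · rw [hlst]
        simp [hp]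

-- ===== VERDICT (by name: the statement is the Claim_ definition above) =====
theorem solve_spec : Claim_equal_solve := by
  intro A B D hdom hpre
  unfold Spec_solve
  have hB : (1:Int) ≤ B := hpre
  show solve A B D = solve_alt A B D
  unfold solve solve_alt
  obtain ⟨hinv, hlst⟩ := sieve_main A B hB (B+1) (by omega) le_rfl
  show ((PySem.List.pyRange 2 (B+1) 1).foldl (sieveStep A B) (sieveInit B, [])).2.foldl _ 0 = _
  rw [hlst]
  rw [PySem.List.foldl_count_if (fun n : Int => digitHitA D n.toNat)
      (List.filter (fun i => decide (A ≤ i) && decide (Nat.Prime i.toNat))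
        (PySem.List.pyRange 2 (B + 1) 1)) 0,
    PySem.List.foldl_count_if (fun n : Int => trialDiv n 2 && (digitsB n.toNat).contains D)
      (PySem.List.pyRange (max A 2) (B + 1) 1) 0,
    List.countP_filter]
  simp only [zero_add]
  by_cases hA : max A 2 ≤ B + 1
  · rw [PySem.List.pyRange_one_append 2 (max A 2) (B+1) (by omega) hA, List.countP_append]
    have h1 : List.countP
        (fun i => digitHitA D i.toNat && (decide (A ≤ i) && decide (Nat.Prime i.toNat)))
        (PySem.List.pyRange 2 (max A 2) 1) = 0 := by
      rw [List.countP_eq_zero]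
      intro i hi
      obtain ⟨hi1, hi2⟩ := (PySem.List.mem_pyRange_one).mp hi
      have hnA : ¬ (A ≤ i) := by omega
      simp [hnA]
    rw [h1, Nat.zero_add]
    congr 1
    apply List.countP_congr
    intro i hi
    obtain ⟨hi1, hi2⟩ := (PySem.List.mem_pyRange_one).mp hi
    have h2i : (2:Int) ≤ i := by omega
    have hAi : A ≤ i := by omega
    rw [digitHit_eq_contains, trialDiv_eq_prime i h2i]
    simp [hAi, and_comm]
  · rw [PySem.List.pyRange_one_eq_nil (by omega : B + 1 ≤ max A 2)]
    simp only [List.countP_nil]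
    have h0 : List.countP
        (fun i => digitHitA D i.toNat && (decide (A ≤ i) && decide (Nat.Prime i.toNat)))
        (PySem.List.pyRange 2 (B+1) 1) = 0 := by
      rw [List.countP_eq_zero]
      intro i hi
      obtain ⟨hi1, hi2⟩ := (PySem.List.mem_pyRange_one).mp hi
      have hnA : ¬ (A ≤ i) := by omega
      simp [hnA]
    rw [h0]
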